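-- pv_equiv track=rewrite | github.com/timeipert/chantdigger-restored | corpus_to_monodi/transform.py | parse_syllables_and_melody
-- ===== SOURCE A (Python) =====
-- def parse_syllables_and_melody(line):
--     """
--     Split a melody line into:
--       - text_syllables: the syllable texts extracted from bracketed tokens (e.g. "[RI-]")
--       - melodic_content: a list of strings, each containing the tokens that follow the corresponding bracketed syllable.
--
--     Example:
--        Input: "[RI-] a h a g"
--        Returns: (["RI-"], ["a h a g"])
--     """
--     tokens = line.split()
--     text_syllables = []
--     melodic_content = []
--     current_tokens = []
--
--     for token in tokens:
--         if token.startswith('[') and token.endswith(']'):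
--             if current_tokens:
--                 melodic_content.append(" ".join(current_tokens))
--                 current_tokens = []
--             syllable = token.strip("[]")
--             text_syllables.append(syllable)
--         else:
--             current_tokens.append(token)
--     if current_tokens:
--         melodic_content.append(" ".join(current_tokens))
--     return text_syllables, melodic_content
-- ===== SOURCE B (Python) =====
-- def parse_syllables_and_melody(line):
--     """Stack-based run-at-a-time scan: each melodic run is consumed whole by an
--     inner loop when its first token appears; no pending buffer, no final flush."""
--     def is_bracket(tok):
--         return tok.startswith('[') and tok.endswith(']')
--
--     stack = line.split()[::-1]  # pop() yields the tokens in original order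
--     text_syllables = []
--     melodic_content = []
--     while stack:
--         tok = stack.pop()
--         if is_bracket(tok):
--             text_syllables.append(tok.strip('[]'))
--         else:
--             run = [tok]
--             while stack and not is_bracket(stack[-1]):
--                 run.append(stack.pop())
--             melodic_content.append(' '.join(run))
--     return text_syllables, melodic_content
-- ===== Notes on version B (the rewrite author's own statement) =====
-- stated objective: alternative
-- what changed: Replaces A's pending-buffer-and-flush accumulator (flush on next bracket and again after the loop) with a stack-based run-at-a-time scan: a nested inner loop consumes a whole melodic run the moment its first token appears, so there is no current_tokens buffer and no end-of-loop flush.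
import Mathlib
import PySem

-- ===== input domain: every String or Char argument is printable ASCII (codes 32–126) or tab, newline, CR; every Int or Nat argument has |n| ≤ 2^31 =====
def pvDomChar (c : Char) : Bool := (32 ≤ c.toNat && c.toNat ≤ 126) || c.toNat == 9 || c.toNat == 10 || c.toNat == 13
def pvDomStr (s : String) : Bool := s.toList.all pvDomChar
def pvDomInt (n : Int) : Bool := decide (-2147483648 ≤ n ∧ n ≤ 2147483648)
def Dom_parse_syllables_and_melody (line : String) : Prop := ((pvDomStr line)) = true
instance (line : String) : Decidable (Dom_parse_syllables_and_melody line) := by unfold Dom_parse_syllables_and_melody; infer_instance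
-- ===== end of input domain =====

-- B replaces A's pending-buffer-and-flush accumulator with a stack-based run-at-a-time
-- scan (inner loop consumes each melodic run whole); alternative decomposition, same cost.


-- ===== PORT A =====
-- the loop body of A, state = (text_syllables, melodic_content, current_tokens)
def pvStepA (st : List String × List String × List String) (token : String) :
    List String × List String × List String :=
  let (syls, mel, cur) := st
  if PySem.Str.startswith token "[" && PySem.Str.endswith token "]" then
    let mel' := if cur ≠ [] then mel ++ [PySem.Str.join " " cur] else mel
    (syls ++ [PySem.Str.stripChars token "[]"], mel', [])
  else
    (syls, mel, cur ++ [token])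

def parse_syllables_and_melody (line : String) : List String × List String :=
  let tokens := PySem.Str.split₀ line
  let st := tokens.foldl pvStepA ([], [], [])
  if st.2.2 ≠ [] then (st.1, st.2.1 ++ [PySem.Str.join " " st.2.2]) else (st.1, st.2.1)

-- ===== PORT B =====
def pvIsBracket (tok : String) : Bool :=
  PySem.Str.startswith tok "[" && PySem.Str.endswith tok "]"

-- inner while loop of B: move tokens from the stack onto `run` until the next bracket;
-- the reversed Python stack popped from its end is represented as the list of remaining
-- tokens consumed from the head (same sequence of popped values; stack[-1] = head).
def pvInner (run : List String) (stack : List String) : List String × List String :=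
  match stack with
  | [] => (run, [])
  | t :: ts => if pvIsBracket t then (run, t :: ts) else pvInner (run ++ [t]) ts

theorem pvInner_snd_le (run stack : List String) : (pvInner run stack).2.length ≤ stack.length := by
  induction stack generalizing run with
  | nil => simp [pvInner]
  | cons t ts ih =>
    simp only [pvInner]
    split
    · simp
    · exact le_trans (ih (run ++ [t])) (by simp)

-- outer while loop of B
def pvLoopB (stack syls mel : List String) : List String × List String :=
  match stack with
  | [] => (syls, mel)
  | tok :: rest =>
    if pvIsBracket tok then
      pvLoopB rest (syls ++ [PySem.Str.stripChars tok "[]"]) mel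
    else
      let rr := pvInner [tok] rest
      pvLoopB rr.2 syls (mel ++ [PySem.Str.join " " rr.1])
termination_by stack.length
decreasing_by
  · simp
  · have := pvInner_snd_le [tok] rest; simp; omega

def parse_syllables_and_melody_alt (line : String) : List String × List String :=
  pvLoopB (PySem.Str.split₀ line) [] []

-- ===== PRECONDITION & SPEC =====
def Spec_parse_syllables_and_melody (line : String) (out : List String × List String) : Prop := out = parse_syllables_and_melody_alt line
instance (line : String) (out : List String × List String) : Decidable (Spec_parse_syllables_and_melody line out) := by unfold Spec_parse_syllables_and_melody; infer_instance

-- ===== CLAIM (what is proved, stated in full; the proofs are below) =====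
def Claim_equal_parse_syllables_and_melody : Prop := ∀ (line : String), Dom_parse_syllables_and_melody line → Spec_parse_syllables_and_melody line (parse_syllables_and_melody line)

-- ===== LEMMAS AND PROOFS =====

-- A's final flush, as a function of the loop state
def pvFlushA (st : List String × List String × List String) : List String × List String :=
  if st.2.2 ≠ [] then (st.1, st.2.1 ++ [PySem.Str.join " " st.2.2]) else (st.1, st.2.1)

-- unfolding equations for the ports' loops at a decided bracket test
theorem pvStepA_bracket (syls mel cur : List String) (t : String) (hb : pvIsBracket t = true) :
    pvStepA (syls, mel, cur) t =
      (syls ++ [PySem.Str.stripChars t "[]"],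
       if cur ≠ [] then mel ++ [PySem.Str.join " " cur] else mel, []) := by
  simp only [pvStepA]
  rw [show (PySem.Str.startswith t "[" && PySem.Str.endswith t "]") = pvIsBracket t from rfl, hb]
  simp

theorem pvStepA_plain (syls mel cur : List String) (t : String) (hb : pvIsBracket t = false) :
    pvStepA (syls, mel, cur) t = (syls, mel, cur ++ [t]) := by
  simp only [pvStepA]
  rw [show (PySem.Str.startswith t "[" && PySem.Str.endswith t "]") = pvIsBracket t from rfl, hb]
  simp

theorem pvInner_bracket (run rest : List String) (t : String) (hb : pvIsBracket t = true) :
    pvInner run (t :: rest) = (run, t :: rest) := by simp [pvInner, hb]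

theorem pvInner_plain (run rest : List String) (t : String) (hb : pvIsBracket t = false) :
    pvInner run (t :: rest) = pvInner (run ++ [t]) rest := by simp [pvInner, hb]

theorem pvLoopB_nil (syls mel : List String) : pvLoopB [] syls mel = (syls, mel) := by
  rw [pvLoopB]

theorem pvLoopB_bracket (rest syls mel : List String) (t : String) (hb : pvIsBracket t = true) :
    pvLoopB (t :: rest) syls mel = pvLoopB rest (syls ++ [PySem.Str.stripChars t "[]"]) mel := by
  rw [pvLoopB]; simp [hb]

theorem pvLoopB_run (rest syls mel : List String) (t : String) (hb : pvIsBracket t = false) :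
    pvLoopB (t :: rest) syls mel =
      pvLoopB (pvInner [t] rest).2 syls (mel ++ [PySem.Str.join " " (pvInner [t] rest).1]) := by
  rw [pvLoopB]; simp [hb]

-- Main invariant: running A's loop from state (syls, mel, cur) and flushing equals
-- B's run-at-a-time loop, a nonempty pending buffer cur corresponding to a
-- partially consumed run that pvInner finishes.
theorem pvMain (ts : List String) : ∀ (syls mel cur : List String),
    pvFlushA (ts.foldl pvStepA (syls, mel, cur)) =
      if cur = [] then pvLoopB ts syls mel
      else pvLoopB (pvInner cur ts).2 syls (mel ++ [PySem.Str.join " " (pvInner cur ts).1]) := by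
  induction ts with
  | nil =>
    intro syls mel cur
    by_cases hc : cur = [] <;>
      simp [hc, pvFlushA, pvLoopB_nil, pvInner]
  | cons t ts ih =>
    intro syls mel cur
    rw [List.foldl_cons]
    cases hb : pvIsBracket t with
    | true =>
      rw [pvStepA_bracket _ _ _ _ hb, ih, if_pos rfl]
      by_cases hc : cur = []
      · rw [if_pos hc, if_neg (by simp [hc]), pvLoopB_bracket _ _ _ _ hb]
      · rw [if_neg hc, if_pos hc, pvInner_bracket _ _ _ hb, pvLoopB_bracket _ _ _ _ hb]
    | false =>
      rw [pvStepA_plain _ _ _ _ hb, ih, if_neg (by simp)]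
      by_cases hc : cur = []
      · rw [if_pos hc, pvLoopB_run _ _ _ _ hb, hc, List.nil_append]
      · rw [if_neg hc, pvInner_plain _ _ _ hb]

-- ===== VERDICT (by name: the statement is the Claim_ definition above) =====
theorem parse_syllables_and_melody_spec : Claim_equal_parse_syllables_and_melody := by
  intro line _
  unfold Spec_parse_syllables_and_melody parse_syllables_and_melody parse_syllables_and_melody_alt
  have h := pvMain (PySem.Str.split₀ line) [] [] []
  rw [if_pos rfl] at h
  exact h
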